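-- pv_equiv track=rewrite | github.com/kumaramritraj03/Auditify | metadata.py | _sql_type_to_semantic
-- ===== SOURCE A (Python) =====
-- def _sql_type_to_semantic(sql_type: str) -> str:
--     """Map SQL type strings to semantic type categories."""
--     sql_upper = sql_type.upper()
--     if any(t in sql_upper for t in ("INT", "BIGINT", "SMALLINT", "SERIAL")):
--         return "integer"
--     if any(t in sql_upper for t in ("DECIMAL", "NUMERIC", "FLOAT", "DOUBLE", "REAL", "MONEY")):
--         return "numeric"
--     if any(t in sql_upper for t in ("DATE", "TIME", "TIMESTAMP")):
--         return "temporal"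
--     if any(t in sql_upper for t in ("BOOL",)):
--         return "boolean"
--     if any(t in sql_upper for t in ("VARCHAR", "TEXT", "CHAR", "NVARCHAR")):
--         return "text"
--     return "unknown"
-- ===== SOURCE B (Python) =====
-- # Flat priority scan: the redundant keywords of A are removed (BIGINT/SMALLINT
-- # contain INT, TIMESTAMP contains TIME, VARCHAR/NVARCHAR contain CHAR), and the
-- # answer is the category of minimal priority among ALL matching keywords,
-- # accumulated in a single exhaustive pass (no ordered group short-circuit).
-- _KEYWORDS = (
--     ("INT", 0, "integer"), ("SERIAL", 0, "integer"),
--     ("DECIMAL", 1, "numeric"), ("NUMERIC", 1, "numeric"), ("FLOAT", 1, "numeric"),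
--     ("DOUBLE", 1, "numeric"), ("REAL", 1, "numeric"), ("MONEY", 1, "numeric"),
--     ("DATE", 2, "temporal"), ("TIME", 2, "temporal"),
--     ("BOOL", 3, "boolean"),
--     ("TEXT", 4, "text"), ("CHAR", 4, "text"),
-- )
--
--
-- def _sql_type_to_semantic(sql_type: str) -> str:
--     """Map SQL type strings to semantic type categories."""
--     sql_upper = sql_type.upper()
--     best_p, best_c = 5, "unknown"
--     for kw, p, cat in _KEYWORDS:
--         if p < best_p and kw in sql_upper:
--             best_p, best_c = p, cat
--     return best_c
-- ===== Notes on version B (the rewrite author's own statement) =====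
-- stated objective: alternative
-- what changed: Replaced the ordered chain of per-group any() substring checks by a single exhaustive pass over a flat deduplicated keyword list (redundant keywords like BIGINT/SMALLINT/TIMESTAMP/VARCHAR removed because they contain a kept keyword) that keeps the matching category of minimal priority.
import Mathlib
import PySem

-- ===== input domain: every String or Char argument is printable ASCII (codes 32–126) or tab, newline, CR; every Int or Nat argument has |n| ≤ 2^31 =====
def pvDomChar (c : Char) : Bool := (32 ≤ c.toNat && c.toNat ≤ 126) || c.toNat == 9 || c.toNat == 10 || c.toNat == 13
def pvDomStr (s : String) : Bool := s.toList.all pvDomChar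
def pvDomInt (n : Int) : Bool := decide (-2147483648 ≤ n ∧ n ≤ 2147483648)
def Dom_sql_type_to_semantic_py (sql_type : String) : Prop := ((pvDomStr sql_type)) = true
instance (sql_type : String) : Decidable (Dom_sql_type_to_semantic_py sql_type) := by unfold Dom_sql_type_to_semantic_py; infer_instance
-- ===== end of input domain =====

-- B replaces A's ordered chain of per-group any() checks by a single exhaustive pass over a flat deduplicated keyword table keeping the matching category of minimal priority (alternative, same cost).


-- ===== PORT A =====
def sql_type_to_semantic_py (sql_type : String) : String :=
  let sql_upper := PySem.Str.upper sql_type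
  if ["INT", "BIGINT", "SMALLINT", "SERIAL"].any (fun t => PySem.Str.isIn t sql_upper) then "integer"
  else if ["DECIMAL", "NUMERIC", "FLOAT", "DOUBLE", "REAL", "MONEY"].any (fun t => PySem.Str.isIn t sql_upper) then "numeric"
  else if ["DATE", "TIME", "TIMESTAMP"].any (fun t => PySem.Str.isIn t sql_upper) then "temporal"
  else if ["BOOL"].any (fun t => PySem.Str.isIn t sql_upper) then "boolean"
  else if ["VARCHAR", "TEXT", "CHAR", "NVARCHAR"].any (fun t => PySem.Str.isIn t sql_upper) then "text"
  else "unknown"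

-- ===== PORT B =====
-- B's flat keyword table: (keyword, priority, category)
def pvKeywords : List (String × Int × String) :=
  [ ("INT", 0, "integer"), ("SERIAL", 0, "integer"),
    ("DECIMAL", 1, "numeric"), ("NUMERIC", 1, "numeric"), ("FLOAT", 1, "numeric"),
    ("DOUBLE", 1, "numeric"), ("REAL", 1, "numeric"), ("MONEY", 1, "numeric"),
    ("DATE", 2, "temporal"), ("TIME", 2, "temporal"),
    ("BOOL", 3, "boolean"),
    ("TEXT", 4, "text"), ("CHAR", 4, "text") ]

def sql_type_to_semantic_py_alt (sql_type : String) : String :=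
  let sql_upper := PySem.Str.upper sql_type
  (pvKeywords.foldl
    (fun (best : Int × String) kpc =>
      if kpc.2.1 < best.1 && PySem.Str.isIn kpc.1 sql_upper then (kpc.2.1, kpc.2.2) else best)
    ((5 : Int), "unknown")).2

-- ===== PRECONDITION & SPEC =====
def Spec_sql_type_to_semantic_py (sql_type : String) (out : String) : Prop := out = sql_type_to_semantic_py_alt sql_type
instance (sql_type : String) (out : String) : Decidable (Spec_sql_type_to_semantic_py sql_type out) := by unfold Spec_sql_type_to_semantic_py; infer_instance

-- ===== CLAIM (what is proved, stated in full; the proofs are below) =====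
def Claim_equal_sql_type_to_semantic_py : Prop := ∀ (sql_type : String), Dom_sql_type_to_semantic_py sql_type → Spec_sql_type_to_semantic_py sql_type (sql_type_to_semantic_py sql_type)

-- ===== LEMMAS AND PROOFS =====

-- a keyword that contains another keyword as an infix matches only when the contained one does
theorem pv_isIn_mono (a b u : List Char) (h : a <:+: b) :
    PySem.Chars.isIn b u = true → PySem.Chars.isIn a u = true := by
  simp only [PySem.Chars.isIn_iff_infix]
  exact fun hb => h.trans hb

-- ===== VERDICT (by name: the statement is the Claim_ definition above) =====
set_option maxHeartbeats 2000000 in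
theorem sql_type_to_semantic_py_spec : Claim_equal_sql_type_to_semantic_py := by
  intro s _
  unfold Spec_sql_type_to_semantic_py sql_type_to_semantic_py sql_type_to_semantic_py_alt pvKeywords
  have hBI := pv_isIn_mono ['I', 'N', 'T'] ['B', 'I', 'G', 'I', 'N', 'T'] (PySem.Chars.upper s.toList) (by decide)
  have hSI := pv_isIn_mono ['I', 'N', 'T'] ['S', 'M', 'A', 'L', 'L', 'I', 'N', 'T'] (PySem.Chars.upper s.toList) (by decide)
  have hTS := pv_isIn_mono ['T', 'I', 'M', 'E'] ['T', 'I', 'M', 'E', 'S', 'T', 'A', 'M', 'P'] (PySem.Chars.upper s.toList) (by decide)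
  have hVC := pv_isIn_mono ['C', 'H', 'A', 'R'] ['V', 'A', 'R', 'C', 'H', 'A', 'R'] (PySem.Chars.upper s.toList) (by decide)
  have hNC := pv_isIn_mono ['C', 'H', 'A', 'R'] ['N', 'V', 'A', 'R', 'C', 'H', 'A', 'R'] (PySem.Chars.upper s.toList) (by decide)
  cases h0 : PySem.Chars.isIn ['I', 'N', 'T'] (PySem.Chars.upper s.toList) with
  | true => simp [h0]
  | false =>
    have hrBIGINT : PySem.Chars.isIn ['B', 'I', 'G', 'I', 'N', 'T'] (PySem.Chars.upper s.toList) = false := by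
      cases hx : PySem.Chars.isIn ['B', 'I', 'G', 'I', 'N', 'T'] (PySem.Chars.upper s.toList) with
      | false => rfl
      | true => exact absurd (hBI hx) (by simp [h0])
    have hrSMALLINT : PySem.Chars.isIn ['S', 'M', 'A', 'L', 'L', 'I', 'N', 'T'] (PySem.Chars.upper s.toList) = false := by
      cases hx : PySem.Chars.isIn ['S', 'M', 'A', 'L', 'L', 'I', 'N', 'T'] (PySem.Chars.upper s.toList) with
      | false => rfl
      | true => exact absurd (hSI hx) (by simp [h0])
    cases h1 : PySem.Chars.isIn ['S', 'E', 'R', 'I', 'A', 'L'] (PySem.Chars.upper s.toList) with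
    | true => simp [h0, hrBIGINT, hrSMALLINT, h1]
    | false =>
      cases h2 : PySem.Chars.isIn ['D', 'E', 'C', 'I', 'M', 'A', 'L'] (PySem.Chars.upper s.toList) with
      | true => simp [h0, hrBIGINT, hrSMALLINT, h1, h2]
      | false =>
        cases h3 : PySem.Chars.isIn ['N', 'U', 'M', 'E', 'R', 'I', 'C'] (PySem.Chars.upper s.toList) with
        | true => simp [h0, hrBIGINT, hrSMALLINT, h1, h2, h3]
        | false =>
          cases h4 : PySem.Chars.isIn ['F', 'L', 'O', 'A', 'T'] (PySem.Chars.upper s.toList) with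
          | true => simp [h0, hrBIGINT, hrSMALLINT, h1, h2, h3, h4]
          | false =>
            cases h5 : PySem.Chars.isIn ['D', 'O', 'U', 'B', 'L', 'E'] (PySem.Chars.upper s.toList) with
            | true => simp [h0, hrBIGINT, hrSMALLINT, h1, h2, h3, h4, h5]
            | false =>
              cases h6 : PySem.Chars.isIn ['R', 'E', 'A', 'L'] (PySem.Chars.upper s.toList) with
              | true => simp [h0, hrBIGINT, hrSMALLINT, h1, h2, h3, h4, h5, h6]
              | false =>
                cases h7 : PySem.Chars.isIn ['M', 'O', 'N', 'E', 'Y'] (PySem.Chars.upper s.toList) with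
                | true => simp [h0, hrBIGINT, hrSMALLINT, h1, h2, h3, h4, h5, h6, h7]
                | false =>
                  cases h8 : PySem.Chars.isIn ['D', 'A', 'T', 'E'] (PySem.Chars.upper s.toList) with
                  | true => simp [h0, hrBIGINT, hrSMALLINT, h1, h2, h3, h4, h5, h6, h7, h8]
                  | false =>
                    cases h9 : PySem.Chars.isIn ['T', 'I', 'M', 'E'] (PySem.Chars.upper s.toList) with
                    | true => simp [h0, hrBIGINT, hrSMALLINT, h1, h2, h3, h4, h5, h6, h7, h8, h9]
                    | false =>
                      have hrTIMESTAMP : PySem.Chars.isIn ['T', 'I', 'M', 'E', 'S', 'T', 'A', 'M', 'P'] (PySem.Chars.upper s.toList) = false := by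
                        cases hx : PySem.Chars.isIn ['T', 'I', 'M', 'E', 'S', 'T', 'A', 'M', 'P'] (PySem.Chars.upper s.toList) with
                        | false => rfl
                        | true => exact absurd (hTS hx) (by simp [h9])
                      cases h10 : PySem.Chars.isIn ['B', 'O', 'O', 'L'] (PySem.Chars.upper s.toList) with
                      | true => simp [h0, hrBIGINT, hrSMALLINT, h1, h2, h3, h4, h5, h6, h7, h8, h9, hrTIMESTAMP, h10]
                      | false =>
                        cases h11 : PySem.Chars.isIn ['T', 'E', 'X', 'T'] (PySem.Chars.upper s.toList) with
                        | true => simp [h0, hrBIGINT, hrSMALLINT, h1, h2, h3, h4, h5, h6, h7, h8, h9, hrTIMESTAMP, h10, h11]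
                        | false =>
                          cases h12 : PySem.Chars.isIn ['C', 'H', 'A', 'R'] (PySem.Chars.upper s.toList) with
                          | true => simp [h0, hrBIGINT, hrSMALLINT, h1, h2, h3, h4, h5, h6, h7, h8, h9, hrTIMESTAMP, h10, h11, h12]
                          | false =>
                            have hrVARCHAR : PySem.Chars.isIn ['V', 'A', 'R', 'C', 'H', 'A', 'R'] (PySem.Chars.upper s.toList) = false := by
                              cases hx : PySem.Chars.isIn ['V', 'A', 'R', 'C', 'H', 'A', 'R'] (PySem.Chars.upper s.toList) with
                              | false => rfl
                              | true => exact absurd (hVC hx) (by simp [h12])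
                            have hrNVARCHAR : PySem.Chars.isIn ['N', 'V', 'A', 'R', 'C', 'H', 'A', 'R'] (PySem.Chars.upper s.toList) = false := by
                              cases hx : PySem.Chars.isIn ['N', 'V', 'A', 'R', 'C', 'H', 'A', 'R'] (PySem.Chars.upper s.toList) with
                              | false => rfl
                              | true => exact absurd (hNC hx) (by simp [h12])
                            simp [h0, hrBIGINT, hrSMALLINT, h1, h2, h3, h4, h5, h6, h7, h8, h9, hrTIMESTAMP, h10, h11, h12, hrVARCHAR, hrNVARCHAR]
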